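-- pv_equiv track=rewrite | github.com/raunakgithud/Accor-laptop | #Implementing Greedy Algorithms in Pract.py | no_of_leters
-- ===== SOURCE A (Python) =====
-- alphabets = "abcdefghijklmnopqrstuvwxyz"
--
-- def no_of_leters(str,start):
--   included = set()
--   included.add(start)
--   x = {}
--   for i in range(len(alphabets)):
--     for start in str:
--       if start == alphabets[i]:
--         x[start] = i+1
--
--   c = 0
--   for start in x:
--     if c < x[start]:
--       c = x[start]
--   return c
-- ===== SOURCE B (Python) =====
-- alphabets = "abcdefghijklmnopqrstuvwxyz"
--
-- def no_of_leters(str, start):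
--   for i in range(25, -1, -1):
--     if alphabets[i] in str:
--       return i + 1
--   return 0
-- ===== Notes on version B (the rewrite author's own statement) =====
-- stated objective: simpler
-- what changed: Replaces the dict-of-positions build (26 interpreted passes over str filling a dict) plus a max-over-values pass with a single descending alphabet scan that returns at the first letter contained in str; the dead 'included' set and the unused 'start' bookkeeping disappear.
import Mathlib
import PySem

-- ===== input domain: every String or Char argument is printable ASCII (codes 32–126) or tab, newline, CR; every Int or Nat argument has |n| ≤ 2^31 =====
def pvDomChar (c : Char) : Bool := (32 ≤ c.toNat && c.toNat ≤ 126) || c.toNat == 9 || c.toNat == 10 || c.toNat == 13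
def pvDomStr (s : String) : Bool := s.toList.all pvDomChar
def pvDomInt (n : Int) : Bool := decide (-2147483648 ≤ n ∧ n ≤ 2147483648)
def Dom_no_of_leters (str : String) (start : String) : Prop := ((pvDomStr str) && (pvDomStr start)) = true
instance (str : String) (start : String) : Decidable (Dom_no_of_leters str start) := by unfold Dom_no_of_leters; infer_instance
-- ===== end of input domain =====

-- B replaces A's dict-of-positions build (26 passes filling a dict) plus a max-over-values pass
-- with one descending scan over the alphabet that returns at the first letter contained in str (simpler).

def pvAlphabets : String := "abcdefghijklmnopqrstuvwxyz"

-- ===== PORT A =====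
def no_of_leters (str : String) (start : String) : Int :=
  let _included : PySem.Set String := PySem.Set.add PySem.Set.empty start
  let x : PySem.Dict Char Int :=
    (PySem.List.pyRange 0 (PySem.Str.len pvAlphabets) 1).foldl
      (fun x i => str.toList.foldl
        (fun x ch =>
          if ch == PySem.List.pyGetD pvAlphabets.toList i ' ' then x.insert ch (i + 1) else x) x)
      PySem.Dict.empty
  x.keys.foldl (fun c k => if c < x.getD k 0 then x.getD k 0 else c) 0

-- ===== PORT B =====
def pvAltGo (s : List Char) : List Int → Int
  | [] => 0
  | i :: rest =>
      if PySem.Chars.isIn [PySem.List.pyGetD pvAlphabets.toList i ' '] s then i + 1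
      else pvAltGo s rest

def no_of_leters_alt (str : String) (start : String) : Int :=
  pvAltGo str.toList (PySem.List.pyRange 25 (-1) (-1))

-- ===== PRECONDITION & SPEC =====
def Spec_no_of_leters (str : String) (start : String) (out : Int) : Prop := out = no_of_leters_alt str start
instance (str : String) (start : String) (out : Int) : Decidable (Spec_no_of_leters str start out) := by unfold Spec_no_of_leters; infer_instance

-- ===== CLAIM (what is proved, stated in full; the proofs are below) =====
def Claim_equal_no_of_leters : Prop := ∀ (str : String) (start : String), Dom_no_of_leters str start → Spec_no_of_leters str start (no_of_leters str start)

-- ===== LEMMAS AND PROOFS =====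

-- the alphabet index list [0, …, 25] the proofs induct over
def pvIdx : List Int :=
  [0, 1, 2, 3, 4, 5, 6, 7, 8, 9, 10, 11, 12, 13, 14, 15, 16, 17, 18, 19, 20, 21, 22, 23, 24, 25]

-- 'c in s' for a one-character needle is plain membership
lemma pv_isIn_singleton (c : Char) (s : List Char) :
    PySem.Chars.isIn [c] s = decide (c ∈ s) := by
  by_cases h : c ∈ s
  · simp [h, PySem.Chars.isIn_iff_infix, List.singleton_infix_iff]
  · simp [h]
    rw [← Bool.not_eq_true, PySem.Chars.isIn_iff_infix, List.singleton_infix_iff]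
    exact h

-- A's inner loop over str only records whether the letter occurs
lemma pv_innerFold (s : List Char) (a : Char) (v : Int) (x : PySem.Dict Char Int) :
    s.foldl (fun x ch => if ch == a then x.insert ch v else x) x
      = if a ∈ s then x.insert a v else x := by
  induction s generalizing x with
  | nil => simp
  | cons ch rest ih =>
    rw [List.foldl_cons]
    by_cases h : ch = a
    · subst h
      rw [if_pos (by simp), ih]
      by_cases hm : ch ∈ rest <;> simp [hm, PySem.Dict.insert_insert_self]
    · have h' : a ≠ ch := fun e => h e.symm
      rw [if_neg (by simp [h]), ih]
      simp [h']

-- running max of (i+1) stays below any bound dominating the list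
lemma pv_foldl_step_le (m : List Int) (b : Int) (h : ∀ i ∈ m, i + 1 ≤ b) (c : Int) (hc : c ≤ b) :
    m.foldl (fun c i => if c < i + 1 then i + 1 else c) c ≤ b := by
  induction m generalizing c with
  | nil => simpa using hc
  | cons i rest ih =>
    simp only [List.foldl_cons]
    split_ifs with hlt
    · exact ih (fun j hj => h j (List.mem_cons_of_mem _ hj)) _ (h i (List.mem_cons_self ..))
    · exact ih (fun j hj => h j (List.mem_cons_of_mem _ hj)) _ hc

-- descending early-exit scan = running max over the present indices, for any sorted index list
lemma pv_core (s : List Char) (l : List Int) (h0 : ∀ i ∈ l, 0 ≤ i) (hs : l.Pairwise (· < ·)) :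
    pvAltGo s l.reverse
      = (l.filter (fun i => decide (PySem.List.pyGetD pvAlphabets.toList i ' ' ∈ s))).foldl
          (fun c i => if c < i + 1 then i + 1 else c) 0 := by
  induction l using List.reverseRecOn with
  | nil => simp [pvAltGo]
  | append_singleton l' a ih =>
    have hpa := (List.pairwise_append.mp hs)
    have hlt : ∀ i ∈ l', i < a := fun i hi => hpa.2.2 i hi a (by simp)
    have h0' : ∀ i ∈ l', 0 ≤ i := fun i hi => h0 i (by simp [hi])
    have h0a : 0 ≤ a := h0 a (by simp)
    simp only [List.reverse_append, List.reverse_singleton, List.singleton_append, pvAltGo,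
      List.filter_append]
    rw [pv_isIn_singleton]
    by_cases hmem : PySem.List.pyGetD pvAlphabets.toList a ' ' ∈ s
    · simp only [hmem, decide_true, if_true, List.filter_cons, List.filter_nil,
        List.foldl_append, List.foldl_cons, List.foldl_nil]
      have hle : (l'.filter (fun i => decide (PySem.List.pyGetD pvAlphabets.toList i ' ' ∈ s))).foldl
          (fun c i => if c < i + 1 then i + 1 else c) 0 ≤ a := by
        apply pv_foldl_step_le
        · intro i hi
          have := hlt i (List.mem_of_mem_filter hi)
          omega
        · exact h0a
      rw [if_pos (by omega)]
    · simp only [hmem, decide_false, Bool.false_eq_true, if_false, List.filter_cons,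
        List.filter_nil, List.append_nil]
      exact ih h0' hpa.1

-- the full chain for A: its dict has items [(letter i, i+1) | i present], so its max loop
-- is the running max over the filtered index list
lemma pv_main (str start : String) : no_of_leters str start = no_of_leters_alt str start := by
  unfold no_of_leters no_of_leters_alt
  dsimp only
  set s := str.toList with hsdef
  have hrange : PySem.List.pyRange 0 (PySem.Str.len pvAlphabets) 1 = pvIdx := by decide
  have hrange' : PySem.List.pyRange 25 (-1) (-1) = pvIdx.reverse := by decide
  rw [hrange, hrange']
  have h1 : List.foldl (fun (x : PySem.Dict Char Int) (i : Int) =>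
        List.foldl (fun x ch =>
          if ch == PySem.List.pyGetD pvAlphabets.toList i ' ' then x.insert ch (i + 1) else x) x s)
        PySem.Dict.empty pvIdx
      = List.foldl (fun (x : PySem.Dict Char Int) (i : Int) =>
          if PySem.List.pyGetD pvAlphabets.toList i ' ' ∈ s then
            x.insert (PySem.List.pyGetD pvAlphabets.toList i ' ') (i + 1)
          else x) PySem.Dict.empty pvIdx :=
    by
      apply PySem.List.foldl_congr_mem
      intro acc i _
      exact pv_innerFold s _ (i + 1) acc
  rw [h1, PySem.List.foldl_ite_eq_foldl_filter]
  set F := pvIdx.filter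
      (fun i => decide (PySem.List.pyGetD pvAlphabets.toList i ' ' ∈ s)) with hFdef
  set x := List.foldl
      (fun (x : PySem.Dict Char Int) (i : Int) =>
        x.insert (PySem.List.pyGetD pvAlphabets.toList i ' ') (i + 1))
      PySem.Dict.empty F with hxdef
  have hFsub : F.Sublist pvIdx := by rw [hFdef]; exact List.filter_sublist
  have hmapnodup : (pvIdx.map (fun i => PySem.List.pyGetD pvAlphabets.toList i ' ')).Nodup := by
    decide
  have hFnodup : (F.map (fun i => PySem.List.pyGetD pvAlphabets.toList i ' ')).Nodup :=
    ((hFsub.map _).nodup hmapnodup)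
  have hitems : x.items
      = F.map (fun i => (PySem.List.pyGetD pvAlphabets.toList i ' ', i + 1)) := by
    rw [hxdef]
    have := PySem.Dict.items_foldl_insert_fresh
      (k := fun i => PySem.List.pyGetD pvAlphabets.toList i ' ')
      (v := fun i : Int => i + 1) (l := F) (d := PySem.Dict.empty)
      (fun a _ => PySem.Dict.contains_empty _) hFnodup
    simpa using this
  have hkeys : x.keys = F.map (fun i => PySem.List.pyGetD pvAlphabets.toList i ' ') := by
    show x.items.map Prod.fst = _
    rw [hitems, List.map_map]
    rfl
  have hknd : x.keys.Nodup := by rw [hkeys]; exact hFnodup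
  have hget : ∀ i ∈ F, x.getD (PySem.List.pyGetD pvAlphabets.toList i ' ') 0 = i + 1 := by
    intro i hi
    exact PySem.Dict.getD_of_mem_items x (by rw [hitems]; exact List.mem_map_of_mem hi) hknd 0
  rw [hkeys, List.foldl_map]
  have h3 : List.foldl
        (fun (c : Int) (i : Int) =>
          if c < x.getD (PySem.List.pyGetD pvAlphabets.toList i ' ') 0 then
            x.getD (PySem.List.pyGetD pvAlphabets.toList i ' ') 0
          else c) 0 F
      = List.foldl (fun c i => if c < i + 1 then i + 1 else c) 0 F :=
    by
      apply PySem.List.foldl_congr_mem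
      intro acc i hi
      rw [hget i hi]
  rw [h3, pv_core s pvIdx (by decide) (by decide)]

-- ===== VERDICT (by name: the statement is the Claim_ definition above) =====
theorem no_of_leters_spec : Claim_equal_no_of_leters := by
  intro str start _
  unfold Spec_no_of_leters
  exact pv_main str start
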